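-- pv_equiv track=rewrite | github.com/RManLuo/ChatRule | chat_rule_generator.py | modify_path_format
-- ===== SOURCE A (Python) =====
-- def modify_path_format(path, head):
--     """
--     Modify path format for prompt, return a list of path in new format
--     """
--     path_list = []
--     # head = clean_symbol_in_rel(head)
--     for p in path:
--         context = f"{head}(X,Y) <-- "
--         for i, r in enumerate(p.split("|")):
--             # r = clean_symbol_in_rel(r)
--             if i == 0:
--                 first = "X"
--             else:
--                 first = f"Z_{i}"
--             if i == len(p.split("|")) - 1:
--                 last = "Y"
--             else:
--                 last = f"Z_{i + 1}"
--             context += f"{r}({first}, {last}) & "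
--         context = context.strip(" & ")
--         path_list.append(context)
--     return path_list
-- ===== SOURCE B (Python) =====
-- def modify_path_format(path, head):
--     """
--     Modify path format for prompt, return a list of path in new format
--     """
--     def atoms(rels):
--         # build the atom chain back-to-front, threading the next node label
--         s = ""
--         nxt = "Y"
--         for i in range(len(rels) - 1, -1, -1):
--             cur = "X" if i == 0 else f"Z_{i}"
--             atom = f"{rels[i]}({cur}, {nxt})"
--             s = atom if s == "" else atom + " & " + s
--             nxt = cur
--         return s
--     return [(f"{head}(X,Y) <-- " + atoms(p.split("|"))).strip(" & ") for p in path]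
-- ===== Notes on version B (the rewrite author's own statement) =====
-- stated objective: alternative
-- what changed: B builds each rule back-to-front: it walks the relations in reverse, threading the next node label (starting at Y) through an accumulator and prepending each atom with ' & ', so A's forward concatenation with positional first/last branching and a stripped trailing separator disappears.
import Mathlib
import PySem

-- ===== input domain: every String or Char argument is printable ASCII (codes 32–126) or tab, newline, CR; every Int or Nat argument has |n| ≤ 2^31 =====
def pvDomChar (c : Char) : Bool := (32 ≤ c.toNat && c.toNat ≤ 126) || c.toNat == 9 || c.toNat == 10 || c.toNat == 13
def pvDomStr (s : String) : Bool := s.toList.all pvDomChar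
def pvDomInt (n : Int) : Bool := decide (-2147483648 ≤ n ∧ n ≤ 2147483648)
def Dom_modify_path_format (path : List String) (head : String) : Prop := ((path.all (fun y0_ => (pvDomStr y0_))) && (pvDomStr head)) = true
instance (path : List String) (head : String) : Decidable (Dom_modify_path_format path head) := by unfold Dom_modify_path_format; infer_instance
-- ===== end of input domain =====

-- B builds each rule back-to-front over the reversed relation list, threading the next node
-- label through an accumulator; A concatenates forward with positional branching and strips
-- the trailing separator. Equal return value on all inputs.

-- ===== PORT A =====
def modify_path_format (path : List String) (head : String) : List String :=
  path.foldl (fun path_list p =>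
    let parts : List String := (PySem.Chars.splitOn p.toList "|".toList).map String.ofList
    let context : String :=
      (PySem.List.enumerate parts).foldl (fun context er =>
        let first := if er.1 = 0 then "X" else "Z_" ++ PySem.Int.toStr er.1
        let last := if er.1 = (parts.length : Int) - 1 then "Y" else "Z_" ++ PySem.Int.toStr (er.1 + 1)
        context ++ (er.2 ++ "(" ++ first ++ ", " ++ last ++ ") & "))
        (head ++ "(X,Y) <-- ")
    path_list ++ [PySem.Str.stripChars context " & "]) []

-- ===== PORT B =====
def modify_path_format_alt (path : List String) (head : String) : List String :=
  path.map (fun p =>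
    let rels : List String := (PySem.Chars.splitOn p.toList "|".toList).map String.ofList
    let st : String × String :=
      (PySem.List.pyRange ((rels.length : Int) - 1) (-1) (-1)).foldl (fun (st : String × String) i =>
        let cur := if i = 0 then "X" else "Z_" ++ PySem.Int.toStr i
        let atom := PySem.List.pyGetD rels i "" ++ "(" ++ cur ++ ", " ++ st.2 ++ ")"
        ((if st.1 = "" then atom else atom ++ " & " ++ st.1), cur)) ("", "Y")
    PySem.Str.stripChars (head ++ "(X,Y) <-- " ++ st.1) " & ")

-- ===== PRECONDITION & SPEC =====
def Spec_modify_path_format (path : List String) (head : String) (out : List String) : Prop := out = modify_path_format_alt path head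
instance (path : List String) (head : String) (out : List String) : Decidable (Spec_modify_path_format path head out) := by unfold Spec_modify_path_format; infer_instance

-- ===== CLAIM (what is proved, stated in full; the proofs are below) =====
def Claim_equal_modify_path_format : Prop := ∀ (path : List String) (head : String), Dom_modify_path_format path head → Spec_modify_path_format path head (modify_path_format path head)

-- ===== LEMMAS AND PROOFS =====

theorem pv_go_ne_nil (sep : List Char) (fuel : Nat) (l cur : List Char) (acc : List (List Char)) :
    PySem.Chars.splitOn.go sep fuel l cur acc ≠ [] := by
  induction fuel generalizing l cur acc with
  | zero => simp [PySem.Chars.splitOn.go]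
  | succ n ih =>
    cases l with
    | nil => simp [PySem.Chars.splitOn.go]
    | cons c rest =>
      rw [PySem.Chars.splitOn.go]
      split
      · exact ih _ _ _
      · exact ih _ _ _

theorem pv_splitOn_ne_nil (s sep : List Char) : PySem.Chars.splitOn s sep ≠ [] :=
  pv_go_ne_nil sep _ s [] []

-- Str-level join lemmas, derived from the Chars-level ones
theorem pv_join_singleton (sep a : String) : PySem.Str.join sep [a] = a := by
  apply String.toList_inj.mp
  rw [PySem.Str.toList_join]
  simp [PySem.Chars.join_singleton]

theorem pv_join_cons_cons (sep a b : String) (t : List String) :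
    PySem.Str.join sep (a :: b :: t) = a ++ sep ++ PySem.Str.join sep (b :: t) := by
  apply String.toList_inj.mp
  rw [PySem.Str.toList_join]
  simp only [List.map_cons, PySem.Chars.join_cons_cons, String.toList_append, PySem.Str.toList_join]

-- the atom of position i (shared characterisation of both ports' per-relation piece)
def pvAtom (rels : List String) (i : Int) : String :=
  PySem.List.pyGetD rels i "" ++ "(" ++ (if i = 0 then "X" else "Z_" ++ PySem.Int.toStr i) ++ ", " ++
    (if i = (rels.length : Int) - 1 then "Y" else "Z_" ++ PySem.Int.toStr (i + 1)) ++ ")"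

-- the joined chain of atoms j..k-1 (B's accumulator value)
def pvChain (rels : List String) (j : Int) : String :=
  PySem.Str.join " & " ((PySem.List.pyRange j (rels.length : Int) 1).map (pvAtom rels))

-- the threaded "next node" label of B after processing indices j..k-1
def pvNode (rels : List String) (j : Int) : String :=
  if j = (rels.length : Int) then "Y" else if j = 0 then "X" else "Z_" ++ PySem.Int.toStr j

-- B's loop body, as a named function (definitionally the port's lambda)
def pvStep (rels : List String) (st : String × String) (i : Int) : String × String :=
  ((if st.1 = "" then
      PySem.List.pyGetD rels i "" ++ "(" ++ (if i = 0 then "X" else "Z_" ++ PySem.Int.toStr i) ++ ", " ++ st.2 ++ ")"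
    else
      (PySem.List.pyGetD rels i "" ++ "(" ++ (if i = 0 then "X" else "Z_" ++ PySem.Int.toStr i) ++ ", " ++ st.2 ++ ")") ++ " & " ++ st.1),
    (if i = 0 then "X" else "Z_" ++ PySem.Int.toStr i))

theorem pv_append_paren_ne_nil (a : String) : a ++ ")" ≠ "" := by
  intro h
  have := congrArg String.toList h
  simp [String.toList_append] at this

theorem pv_chain_ne_nil (rels : List String) (j : Int) (hj : j < (rels.length : Int)) :
    pvChain rels j ≠ "" := by
  unfold pvChain
  rw [PySem.List.pyRange_one_cons hj, List.map_cons]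
  cases h : (PySem.List.pyRange (j + 1) (rels.length : Int) 1).map (pvAtom rels) with
  | nil =>
    rw [pv_join_singleton]
    unfold pvAtom
    exact pv_append_paren_ne_nil _
  | cons y t =>
    rw [pv_join_cons_cons]
    intro hh
    have := congrArg String.toList hh
    simp only [String.toList_append] at this
    have h2 := congrArg List.length this
    simp at h2

-- B's backward fold, characterised: after consuming indices j-1 … 0 from state
-- (chain of atoms j.., node j) it reaches (chain of all atoms, node 0)
theorem pv_back_fold (rels : List String) (hk : rels ≠ []) (j : Nat) (hj : j ≤ rels.length) :
    (PySem.List.pyRange ((j : Int) - 1) (-1) (-1)).foldl (pvStep rels)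
      (pvChain rels (j : Int), pvNode rels (j : Int))
    = (pvChain rels 0, pvNode rels 0) := by
  have hk1 : 1 ≤ rels.length := List.length_pos_of_ne_nil hk
  induction j with
  | zero =>
    rw [show ((0 : Nat) : Int) - 1 = -1 by simp,
      PySem.List.pyRange_neg_one_eq_nil (le_refl (-1 : Int))]
    simp
  | succ m ih =>
    have hm : (m : Int) < (rels.length : Int) := by exact_mod_cast hj
    rw [(by push_cast; ring : ((m + 1 : Nat) : Int) - 1 = (m : Int)),
      PySem.List.pyRange_neg_one_cons (by omega : (-1 : Int) < (m : Int)), List.foldl_cons]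
    have hstep : pvStep rels (pvChain rels ((m + 1 : Nat) : Int), pvNode rels ((m + 1 : Nat) : Int)) (m : Int)
        = (pvChain rels (m : Int), pvNode rels (m : Int)) := by
      unfold pvStep
      dsimp only
      have hnode1 : pvNode rels ((m + 1 : Nat) : Int)
          = if (m : Int) = (rels.length : Int) - 1 then "Y" else "Z_" ++ PySem.Int.toStr ((m : Int) + 1) := by
        unfold pvNode
        push_cast
        by_cases hlast : (m : Int) = (rels.length : Int) - 1
        · rw [if_pos (by omega), if_pos hlast]
        · rw [if_neg (by omega), if_neg (by omega), if_neg hlast]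
      have hnode2 : (if (m : Int) = 0 then "X" else "Z_" ++ PySem.Int.toStr (m : Int)) = pvNode rels (m : Int) := by
        unfold pvNode
        rw [if_neg (by omega : ¬ (m : Int) = (rels.length : Int))]
      rw [hnode1]
      by_cases hend : m + 1 = rels.length
      · have hempty : pvChain rels ((m + 1 : Nat) : Int) = "" := by
          unfold pvChain
          rw [PySem.List.pyRange_one_eq_nil (by omega : (rels.length : Int) ≤ ((m + 1 : Nat) : Int))]
          rfl
        rw [hempty, if_pos rfl]
        refine Prod.ext ?_ hnode2
        show pvAtom rels (m : Int) = pvChain rels (m : Int)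
        unfold pvChain
        rw [PySem.List.pyRange_one_cons hm, List.map_cons,
          PySem.List.pyRange_one_eq_nil (by omega : (rels.length : Int) ≤ (m : Int) + 1)]
        rw [List.map_nil, pv_join_singleton]
      · have hlt : ((m + 1 : Nat) : Int) < (rels.length : Int) := by push_cast; omega
        rw [if_neg (pv_chain_ne_nil rels _ hlt)]
        refine Prod.ext ?_ hnode2
        show pvAtom rels (m : Int) ++ " & " ++ pvChain rels ((m + 1 : Nat) : Int) = pvChain rels (m : Int)
        unfold pvChain
        rw [PySem.List.pyRange_one_cons hm, List.map_cons,
          show (m : Int) + 1 = ((m + 1 : Nat) : Int) by push_cast; ring]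
        cases hc : (PySem.List.pyRange ((m + 1 : Nat) : Int) (rels.length : Int) 1).map (pvAtom rels) with
        | nil =>
          exfalso
          have := congrArg List.length hc
          rw [List.length_map, PySem.List.length_pyRange_one] at this
          simp at this
          omega
        | cons y t => rw [pv_join_cons_cons]
    rw [hstep]
    exact ih (by omega)

-- B's fold from its literal initial state
theorem pv_back_full (rels : List String) (hk : rels ≠ []) :
    (PySem.List.pyRange ((rels.length : Int) - 1) (-1) (-1)).foldl (pvStep rels) ("", "Y")
    = (pvChain rels 0, pvNode rels 0) := by
  have h := pv_back_fold rels hk rels.length (le_refl _)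
  have hinit : pvChain rels ((rels.length : Nat) : Int) = "" := by
    unfold pvChain
    rw [PySem.List.pyRange_one_eq_nil (le_refl _)]
    rfl
  have hinitn : pvNode rels ((rels.length : Nat) : Int) = "Y" := by
    unfold pvNode; rw [if_pos rfl]
  rw [hinit, hinitn] at h
  exact h

-- a string-appending fold, at the char-list level (used for A's forward fold)
theorem pv_toList_foldl {β : Type} (f : String → β → String) (gL : β → List Char)
    (h : ∀ c e, (f c e).toList = c.toList ++ gL e) (l : List β) (a : String) :
    (l.foldl f a).toList = a.toList ++ l.flatMap gL := by
  induction l generalizing a with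
  | nil => simp
  | cons x t ih => simp [List.foldl_cons, ih, h]

-- atoms each carrying the separator as a suffix concatenate to a join plus one trailing separator
theorem pv_flatMap_eq_join_append {β : Type} (sep : List Char) (f g : β → List Char)
    (l : List β) (hne : l ≠ []) (h : ∀ e ∈ l, f e = g e ++ sep) :
    l.flatMap f = PySem.Chars.join sep (l.map g) ++ sep := by
  induction l with
  | nil => exact absurd rfl hne
  | cons x t ih =>
    cases t with
    | nil => simp [PySem.Chars.join_singleton, h x (by simp)]
    | cons y u =>
      have := ih (by simp) (fun e he => h e (List.mem_cons_of_mem _ he))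
      simp only [List.flatMap_cons] at this ⊢
      rw [h x (by simp), List.map_cons, List.map_cons, PySem.Chars.join_cons_cons, this]
      simp [List.append_assoc]

-- stripping ignores a suffix made of strip characters
theorem pv_stripChars_append (cs sfx chars : List Char)
    (h : ∀ c ∈ sfx, chars.contains c) :
    PySem.Chars.stripChars (cs ++ sfx) chars = PySem.Chars.stripChars cs chars := by
  simp only [PySem.Chars.stripChars]
  have hs : List.dropWhile (fun c => chars.contains c) sfx = [] :=
    List.dropWhile_eq_nil_iff.mpr (by intro x hx; exact h x hx)
  have hs' : List.dropWhile (fun c => chars.contains c) sfx.reverse = [] :=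
    List.dropWhile_eq_nil_iff.mpr (by intro x hx; exact h x (List.mem_reverse.mp hx))
  rw [List.dropWhile_append]
  split
  · next he =>
    rw [List.isEmpty_iff] at he
    rw [he, hs]
  · rw [List.reverse_append, List.dropWhile_append, hs']
    simp

-- A's per-path string equals prefix ++ chain ++ " & " before stripping
theorem pv_A_chain (head : String) (parts : List String) (hne : parts ≠ []) :
    ((PySem.List.enumerate parts).foldl (fun context er =>
        context ++ (er.2 ++ "(" ++ (if er.1 = 0 then "X" else "Z_" ++ PySem.Int.toStr er.1) ++ ", " ++
          (if er.1 = (parts.length : Int) - 1 then "Y" else "Z_" ++ PySem.Int.toStr (er.1 + 1)) ++ ") & "))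
      (head ++ "(X,Y) <-- ")).toList
    = (head ++ "(X,Y) <-- ").toList ++ ((pvChain parts 0).toList ++ " & ".toList) := by
  have hk : 1 ≤ parts.length := List.length_pos_of_ne_nil hne
  rw [pv_toList_foldl _
    (fun er : Int × String => er.2.toList ++ "(".toList ++
      (if er.1 = 0 then "X" else "Z_" ++ PySem.Int.toStr er.1).toList ++ ", ".toList ++
      (if er.1 = (parts.length : Int) - 1 then "Y" else "Z_" ++ PySem.Int.toStr (er.1 + 1)).toList ++
      ") & ".toList)
    (by intro c e; simp [String.toList_append, List.append_assoc])]
  rw [PySem.List.enumerate_eq_map_pyRange parts ""]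
  simp only [PySem.List.len_eq]
  rw [List.flatMap_map]
  have hrne : PySem.List.pyRange 0 (parts.length : Int) 1 ≠ [] := by
    rw [PySem.List.pyRange_one_cons (by omega : (0 : Int) < (parts.length : Int))]
    simp
  rw [pv_flatMap_eq_join_append " & ".toList _ (fun j => (pvAtom parts j).toList) _ hrne ?hpt]
  case hpt =>
    intro j _
    unfold pvAtom
    simp only [String.toList_append]
    have hsep : ") & ".toList = ")".toList ++ " & ".toList := by decide
    rw [hsep]
    simp [List.append_assoc]
  unfold pvChain
  rw [PySem.Str.toList_join, List.map_map]
  simp [List.append_assoc, Function.comp_def]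

-- ===== VERDICT (by name: the statement is the Claim_ definition above) =====
theorem modify_path_format_spec : Claim_equal_modify_path_format := by
  intro path head _
  unfold Spec_modify_path_format modify_path_format modify_path_format_alt
  simp only [PySem.List.foldl_append_singleton_eq_map, List.nil_append]
  apply List.map_congr_left
  intro p _
  have hne : (PySem.Chars.splitOn p.toList "|".toList).map String.ofList ≠ [] := by
    intro h
    exact pv_splitOn_ne_nil p.toList "|".toList (List.map_eq_nil_iff.mp h)
  show PySem.Str.stripChars
      ((PySem.List.enumerate ((PySem.Chars.splitOn p.toList "|".toList).map String.ofList)).foldl (fun context er =>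
          context ++ (er.2 ++ "(" ++ (if er.1 = 0 then "X" else "Z_" ++ PySem.Int.toStr er.1) ++ ", " ++
            (if er.1 = (((PySem.Chars.splitOn p.toList "|".toList).map String.ofList).length : Int) - 1 then "Y" else "Z_" ++ PySem.Int.toStr (er.1 + 1)) ++ ") & "))
        (head ++ "(X,Y) <-- ")) " & "
    = PySem.Str.stripChars (head ++ "(X,Y) <-- " ++
        ((PySem.List.pyRange ((((PySem.Chars.splitOn p.toList "|".toList).map String.ofList).length : Int) - 1) (-1) (-1)).foldl
          (pvStep ((PySem.Chars.splitOn p.toList "|".toList).map String.ofList)) ("", "Y")).1) " & "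
  rw [pv_back_full _ hne]
  apply String.toList_inj.mp
  rw [PySem.Str.toList_stripChars, PySem.Str.toList_stripChars]
  rw [pv_A_chain head _ hne]
  simp only [String.toList_append]
  rw [← List.append_assoc]
  exact pv_stripChars_append _ _ _ (by intro c hc; exact List.elem_eq_true_of_mem hc)
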